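-- pv_equiv track=rewrite | github.com/legend4137/NLU_Assignment_2_Word2Vec_RNN_Variants | problem_1/train_word2vec.py | generate_cbow_data
-- ===== SOURCE A (Python) =====
-- def generate_cbow_data(corpus, window):
--     data = []
--     for sent in corpus:
--         for i in range(len(sent)):
--             context = []
--             for j in range(i - window, i + window + 1):
--                 if j != i and 0 <= j < len(sent):
--                     context.append(sent[j])
--             if context:
--                 data.append((context, sent[i]))
--     return data
-- ===== SOURCE B (Python) =====
-- def generate_cbow_data(corpus, window):
--     return [
--         (context, sent[i])
--         for sent in corpus
--         for i in range(len(sent))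
--         for context in [sent[max(0, i - window):i] + sent[i + 1:i + 1 + window]]
--         if context
--     ]
-- ===== Notes on version B (the rewrite author's own statement) =====
-- stated objective: simpler
-- what changed: Replaces the inner bounds-checked j-loop and explicit accumulator with two boundary-clipping slices inside a single list comprehension; Pre_ excludes negative window, a meaningless window size outside the task's natural domain, where A happens to return [] while B's slice stop would wrap.
-- outside the precondition, e.g. on generate_cbow_data([['a', 'b', 'c', 'd', 'e']], -3): A returns [], B returns [(['b', 'c'], 'a'), (['c', 'd'], 'b')]
import Mathlib
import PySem

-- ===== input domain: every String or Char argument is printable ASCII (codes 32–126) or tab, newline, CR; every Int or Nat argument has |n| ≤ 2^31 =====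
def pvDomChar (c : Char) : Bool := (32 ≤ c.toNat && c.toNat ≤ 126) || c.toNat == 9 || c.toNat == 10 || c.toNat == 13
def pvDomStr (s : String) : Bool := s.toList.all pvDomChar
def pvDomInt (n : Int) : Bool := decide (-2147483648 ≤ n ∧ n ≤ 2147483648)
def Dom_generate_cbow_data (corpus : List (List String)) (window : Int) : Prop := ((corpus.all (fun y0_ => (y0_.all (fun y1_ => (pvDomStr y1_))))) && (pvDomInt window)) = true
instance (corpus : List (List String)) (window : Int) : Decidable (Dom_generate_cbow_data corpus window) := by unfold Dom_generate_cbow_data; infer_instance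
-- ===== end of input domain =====

-- B replaces A's inner bounds-checked j-loop by two boundary-clipping slices inside a
-- single comprehension (objective: simpler; same asymptotic cost).

-- ===== PORT A =====
-- Literal transliteration of A: nested loops as foldl, inner loop appends sent[j]
-- under the guard 'j != i and 0 <= j < len(sent)'.
def generate_cbow_data (corpus : List (List String)) (window : Int) : List (List String × String) :=
  corpus.foldl (fun data sent =>
    (PySem.List.pyRange 0 (sent.length : Int) 1).foldl (fun data i =>
      let context : List String :=
        (PySem.List.pyRange (i - window) (i + window + 1) 1).foldl (fun ctx j =>
          if j ≠ i ∧ 0 ≤ j ∧ j < (sent.length : Int)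
          then ctx ++ [PySem.List.pyGetD sent j ""] else ctx) []
      if context ≠ [] then data ++ [(context, PySem.List.pyGetD sent i "")] else data)
      data) []

-- ===== PORT B =====
-- Literal transliteration of B: one comprehension (flatMap), context built from two slices.
def generate_cbow_data_alt (corpus : List (List String)) (window : Int) : List (List String × String) :=
  corpus.flatMap (fun sent =>
    (PySem.List.pyRange 0 (sent.length : Int) 1).flatMap (fun i =>
      let context : List String :=
        PySem.List.slice sent (some (max 0 (i - window))) (some i) ++
        PySem.List.slice sent (some (i + 1)) (some (i + 1 + window))
      if context ≠ [] then [(context, PySem.List.pyGetD sent i "")] else []))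

-- ===== PRECONDITION & SPEC =====
-- Pre_ excludes negative window, a meaningless window size outside the task's natural
-- domain: A happens to return [] there (empty ranges) while B's slice stop would wrap.
def Pre_generate_cbow_data (corpus : List (List String)) (window : Int) : Prop := 0 ≤ window
instance (corpus : List (List String)) (window : Int) : Decidable (Pre_generate_cbow_data corpus window) := by unfold Pre_generate_cbow_data; infer_instance

def pvWitness_generate_cbow_data : List (List String) × Int := ([["the", "cat", "sat"]], 1)

def Spec_generate_cbow_data (corpus : List (List String)) (window : Int) (out : List (List String × String)) : Prop := out = generate_cbow_data_alt corpus window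
instance (corpus : List (List String)) (window : Int) (out : List (List String × String)) : Decidable (Spec_generate_cbow_data corpus window out) := by unfold Spec_generate_cbow_data; infer_instance

-- ===== CLAIM (what is proved, stated in full; the proofs are below) =====
def Claim_equal_generate_cbow_data : Prop := ∀ (corpus : List (List String)) (window : Int), Dom_generate_cbow_data corpus window → Pre_generate_cbow_data corpus window → Spec_generate_cbow_data corpus window (generate_cbow_data corpus window)

-- ===== LEMMAS AND PROOFS =====

-- mapping pyGetD over a range of in-bounds indices is a drop/take
theorem map_getD_pyRange (sent : List String) (a b : Int) (h0 : 0 ≤ a) (h0b : 0 ≤ b)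
    (hb : b ≤ (sent.length : Int)) :
    (PySem.List.pyRange a b 1).map (fun j => PySem.List.pyGetD sent j "") =
      List.take (b.toNat - a.toNat) (List.drop a.toNat sent) := by
  rw [PySem.List.pyRange_one, List.map_map]
  apply List.ext_getElem
  · simp; omega
  · intro k hk hk'
    simp only [List.length_map, List.length_range] at hk
    have hab : a + (k : Int) = ((a.toNat + k : Nat) : Int) := by omega
    have hlt : a.toNat + k < sent.length := by omega
    simp only [List.getElem_map, List.getElem_range, Function.comp_apply, hab,
      PySem.List.pyGetD_natCast, List.getD_eq_getElem?_getD,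
      List.getElem?_eq_getElem hlt, Option.getD_some,
      List.getElem_take, List.getElem_drop]

-- the inner j-loop of A equals B's two slices, for 0 ≤ i < len(sent) and 0 ≤ w
theorem ctx_eq (sent : List String) (w i : Int) (hw : 0 ≤ w)
    (hi0 : 0 ≤ i) (hil : i < (sent.length : Int)) :
    (PySem.List.pyRange (i - w) (i + w + 1) 1).foldl (fun ctx j =>
        if j ≠ i ∧ 0 ≤ j ∧ j < (sent.length : Int)
        then ctx ++ [PySem.List.pyGetD sent j ""] else ctx) [] =
      PySem.List.slice sent (some (max 0 (i - w))) (some i) ++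
        PySem.List.slice sent (some (i + 1)) (some (i + 1 + w)) := by
  have hfold := PySem.List.foldl_append_if
      (fun j => decide (j ≠ i ∧ 0 ≤ j ∧ j < (sent.length : Int)))
      (fun j => PySem.List.pyGetD sent j "")
      (PySem.List.pyRange (i - w) (i + w + 1) 1) []
  simp only [decide_eq_true_eq, List.nil_append] at hfold
  rw [hfold]
  rw [PySem.List.slice_toNat sent (by omega) hi0,
      PySem.List.slice_toNat sent (by omega) (by omega)]
  -- split the range at i; left part = left slice, right part = right slice
  rw [PySem.List.pyRange_one_append (i - w) i (i + w + 1) (by omega) (by omega),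
      PySem.List.pyRange_one_cons (show i < i + w + 1 by omega),
      List.filter_append, List.filter_cons]
  have hifalse : ¬ (i ≠ i ∧ 0 ≤ i ∧ i < (sent.length : Int)) := by simp
  simp only [decide_eq_true_eq, if_neg hifalse]
  -- left part
  have hleft : (PySem.List.pyRange (i - w) i 1).filter
      (fun j => decide (j ≠ i ∧ 0 ≤ j ∧ j < (sent.length : Int))) =
      PySem.List.pyRange (max 0 (i - w)) i 1 := by
    rw [PySem.List.pyRange_one_append (i - w) (max 0 (i - w)) i (by omega) (by omega),
        List.filter_append]
    have e1 : (PySem.List.pyRange (i - w) (max 0 (i - w)) 1).filter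
        (fun j => decide (j ≠ i ∧ 0 ≤ j ∧ j < (sent.length : Int))) = [] := by
      rw [List.filter_eq_nil_iff]
      intro j hj
      rw [PySem.List.mem_pyRange_one] at hj
      simp only [decide_eq_true_eq, not_and, ne_eq]
      intro h; omega
    have e2 : (PySem.List.pyRange (max 0 (i - w)) i 1).filter
        (fun j => decide (j ≠ i ∧ 0 ≤ j ∧ j < (sent.length : Int))) =
        PySem.List.pyRange (max 0 (i - w)) i 1 := by
      rw [List.filter_eq_self]
      intro j hj
      rw [PySem.List.mem_pyRange_one] at hj
      simp only [decide_eq_true_eq]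
      refine ⟨by omega, by omega, by omega⟩
    rw [e1, e2, List.nil_append]
  -- right part
  have hright : (PySem.List.pyRange (i + 1) (i + w + 1) 1).filter
      (fun j => decide (j ≠ i ∧ 0 ≤ j ∧ j < (sent.length : Int))) =
      PySem.List.pyRange (i + 1) (min (i + w + 1) (sent.length : Int)) 1 := by
    rw [PySem.List.pyRange_one_append (i + 1) (min (i + w + 1) (sent.length : Int))
          (i + w + 1) (by omega) (by omega),
        List.filter_append]
    have e1 : (PySem.List.pyRange (i + 1) (min (i + w + 1) (sent.length : Int)) 1).filter
        (fun j => decide (j ≠ i ∧ 0 ≤ j ∧ j < (sent.length : Int))) =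
        PySem.List.pyRange (i + 1) (min (i + w + 1) (sent.length : Int)) 1 := by
      rw [List.filter_eq_self]
      intro j hj
      rw [PySem.List.mem_pyRange_one] at hj
      simp only [decide_eq_true_eq]
      refine ⟨by omega, by omega, by omega⟩
    have e2 : (PySem.List.pyRange (min (i + w + 1) (sent.length : Int)) (i + w + 1) 1).filter
        (fun j => decide (j ≠ i ∧ 0 ≤ j ∧ j < (sent.length : Int))) = [] := by
      rw [List.filter_eq_nil_iff]
      intro j hj
      rw [PySem.List.mem_pyRange_one] at hj
      simp only [decide_eq_true_eq, not_and, ne_eq]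
      intro h; omega
    rw [e1, e2, List.append_nil]
  rw [hleft, hright, List.map_append]
  congr 1
  · rw [map_getD_pyRange sent _ _ (by omega) hi0 (by omega)]
  · rw [map_getD_pyRange sent _ _ (by omega) (by omega) (by omega)]
    rw [List.take_eq_take_iff]
    simp only [List.length_drop]
    omega

-- one sentence of A's outer loop appends exactly B's per-sentence block
theorem sent_eq (sent : List String) (w : Int) (hw : 0 ≤ w)
    (data : List (List String × String)) :
    (PySem.List.pyRange 0 (sent.length : Int) 1).foldl (fun data i =>
        let context : List String :=
          (PySem.List.pyRange (i - w) (i + w + 1) 1).foldl (fun ctx j =>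
            if j ≠ i ∧ 0 ≤ j ∧ j < (sent.length : Int)
            then ctx ++ [PySem.List.pyGetD sent j ""] else ctx) []
        if context ≠ [] then data ++ [(context, PySem.List.pyGetD sent i "")] else data)
      data =
    data ++ (PySem.List.pyRange 0 (sent.length : Int) 1).flatMap (fun i =>
        let context : List String :=
          PySem.List.slice sent (some (max 0 (i - w))) (some i) ++
          PySem.List.slice sent (some (i + 1)) (some (i + 1 + w))
        if context ≠ [] then [(context, PySem.List.pyGetD sent i "")] else []) := by
  rw [PySem.List.foldl_congr_mem _ _ (fun data i =>
      data ++ (let context : List String :=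
          PySem.List.slice sent (some (max 0 (i - w))) (some i) ++
          PySem.List.slice sent (some (i + 1)) (some (i + 1 + w))
        if context ≠ [] then [(context, PySem.List.pyGetD sent i "")] else [])) data ?_]
  · exact PySem.List.foldl_append_eq_flatMap _ _ data
  · intro acc i hi
    rw [PySem.List.mem_pyRange_one] at hi
    simp only [ctx_eq sent w i hw hi.1 hi.2]
    split <;> simp

-- ===== VERDICT (by name: the statement is the Claim_ definition above) =====
theorem generate_cbow_data_spec : Claim_equal_generate_cbow_data := by
  intro corpus window _ hw
  unfold Pre_generate_cbow_data at hw
  unfold Spec_generate_cbow_data generate_cbow_data generate_cbow_data_alt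
  have aux : ∀ (cs : List (List String)) (d : List (List String × String)),
      cs.foldl (fun data sent =>
        (PySem.List.pyRange 0 (sent.length : Int) 1).foldl (fun data i =>
          let context : List String :=
            (PySem.List.pyRange (i - window) (i + window + 1) 1).foldl (fun ctx j =>
              if j ≠ i ∧ 0 ≤ j ∧ j < (sent.length : Int)
              then ctx ++ [PySem.List.pyGetD sent j ""] else ctx) []
          if context ≠ [] then data ++ [(context, PySem.List.pyGetD sent i "")] else data)
          data) d =
      d ++ cs.flatMap (fun sent =>
        (PySem.List.pyRange 0 (sent.length : Int) 1).flatMap (fun i =>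
          let context : List String :=
            PySem.List.slice sent (some (max 0 (i - window))) (some i) ++
            PySem.List.slice sent (some (i + 1)) (some (i + 1 + window))
          if context ≠ [] then [(context, PySem.List.pyGetD sent i "")] else [])) := by
    intro cs
    induction cs with
    | nil => intro d; simp
    | cons s t iht =>
      intro d
      rw [List.foldl_cons, sent_eq s window hw d, iht, List.flatMap_cons, List.append_assoc]
  simpa using aux corpus []
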